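-- pv_equiv track=rewrite | github.com/Pusty/writeups | GoogleCTF2020/dotnet.py | swapchars
-- ===== SOURCE A (Python) =====
-- def swapchars(h):
--     o = [h[i] for i in range(len(h))]
--     i = 0
--     while i < len(h)-1:
--         if i != 28 and i != 27:
--             p = o[i+1]
--             o[i+1] = o[i]
--             o[i] = p
--         i = i + 3
--     return o
-- ===== SOURCE B (Python) =====
-- def swapchars(h):
--     n = len(h)
--     def src(j):
--         if j % 3 == 0 and j + 1 < n and j != 27:
--             return j + 1
--         if j % 3 == 1 and j != 28:
--             return j - 1
--         return j
--     return [h[src(j)] for j in range(n)]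
-- ===== Notes on version B (the rewrite author's own statement) =====
-- stated objective: alternative
-- what changed: B computes a closed-form index permutation src(j) per output position and builds the result as a pure gather [h[src(j)] for j in range(n)], instead of A's stride-3 in-place swap pass over a mutated copy.
import Mathlib
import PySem

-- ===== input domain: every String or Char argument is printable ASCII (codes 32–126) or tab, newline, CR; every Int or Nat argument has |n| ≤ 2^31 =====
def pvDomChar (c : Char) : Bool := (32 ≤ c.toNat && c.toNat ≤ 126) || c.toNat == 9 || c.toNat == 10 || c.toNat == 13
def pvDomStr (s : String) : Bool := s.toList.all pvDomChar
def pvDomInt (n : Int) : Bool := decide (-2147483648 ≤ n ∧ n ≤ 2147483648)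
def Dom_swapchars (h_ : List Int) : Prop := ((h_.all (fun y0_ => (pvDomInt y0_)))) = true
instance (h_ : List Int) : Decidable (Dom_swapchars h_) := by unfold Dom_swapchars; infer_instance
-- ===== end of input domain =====

-- B builds the output as a pure gather: o[j] = h[src(j)] for a closed-form index permutation
-- src (which encodes A's pair swaps, the i==27 skip and the lone-trailing-element rule),
-- instead of A's in-place swap pass over a copy; same cost, different algorithmic decomposition.


-- ===== PORT A =====
-- o = copy of h; while i < len(h)-1: if i != 28 and i != 27: swap o[i], o[i+1]; i += 3
def swapcharsGo (h_ o : List Int) (i : Nat) : List Int :=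
  if _h : i < h_.length - 1 then
    let o' :=
      if i ≠ 28 ∧ i ≠ 27 then
        let p := PySem.List.pyGetD o ((i : Int) + 1) 0
        let o1 := PySem.List.pySetD o ((i : Int) + 1) (PySem.List.pyGetD o (i : Int) 0)
        PySem.List.pySetD o1 (i : Int) p
      else o
    swapcharsGo h_ o' (i + 3)
  else o
termination_by h_.length - 1 - i
decreasing_by omega

def swapchars (h_ : List Int) : List Int :=
  let o := (PySem.List.pyRange 0 (h_.length : Int) 1).map (fun i => PySem.List.pyGetD h_ i 0)
  swapcharsGo h_ o 0

-- ===== PORT B =====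
-- def src(j): if j%3==0 and j+1<n and j!=27: j+1 elif j%3==1 and j!=28: j-1 else: j
def srcIdx (n j : Int) : Int :=
  if PySem.Int.mod j 3 = 0 ∧ j + 1 < n ∧ j ≠ 27 then j + 1
  else if PySem.Int.mod j 3 = 1 ∧ j ≠ 28 then j - 1
  else j

-- [h[src(j)] for j in range(n)]
def swapchars_alt (h_ : List Int) : List Int :=
  (PySem.List.pyRange 0 (h_.length : Int) 1).map
    (fun j => PySem.List.pyGetD h_ (srcIdx (h_.length : Int) j) 0)

-- ===== PRECONDITION & SPEC =====
def Spec_swapchars (h_ : List Int) (out : List Int) : Prop := out = swapchars_alt h_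
instance (h_ : List Int) (out : List Int) : Decidable (Spec_swapchars h_ out) := by unfold Spec_swapchars; infer_instance

-- ===== CLAIM (what is proved, stated in full; the proofs are below) =====
def Claim_equal_swapchars : Prop := ∀ (h_ : List Int), Dom_swapchars h_ → Spec_swapchars h_ (swapchars h_)

-- ===== LEMMAS AND PROOFS =====

-- Common characterisation of the result: chunk-wise swapped copy of the list from offset i.
def pvF (i : Nat) : List Int → List Int
  | [] => []
  | [a] => [a]
  | [a, b] => if i = 28 ∨ i = 27 then [a, b] else [b, a]
  | a :: b :: c :: rest => (if i = 28 ∨ i = 27 then [a, b, c] else [b, a, c]) ++ pvF (i + 3) rest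

lemma set_app (t l : List Int) (k : Nat) (v : Int) : (t ++ l).set (t.length + k) v = t ++ l.set k v := by
  simp

lemma take_app (t l : List Int) (k : Nat) : (t ++ l).take (t.length + k) = t ++ l.take k := by
  rw [List.take_add, List.take_left, List.drop_left]

lemma swap_set (t : List Int) (a b : Int) (l : List Int) (i : Nat) (ht : t.length = i) :
    ((t ++ a :: b :: l).set (i + 1) a).set i b = t ++ b :: a :: l := by
  subst ht
  rw [set_app]
  have h2 := set_app t ((a :: b :: l).set 1 a) 0 b
  simp only [Nat.add_zero] at h2
  rw [h2]
  simp

lemma drop_app (t l : List Int) (k : Nat) : (t ++ l).drop (t.length + k) = l.drop k := by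
  simp

lemma goA_eq (h_ : List Int) : ∀ (n i : Nat), h_.length - i ≤ n → ∀ (o : List Int), o.length = h_.length →
    swapcharsGo h_ o i = o.take i ++ pvF i (o.drop i) := by
  intro n
  induction n with
  | zero =>
    intro i hle o hlen
    rw [swapcharsGo]
    have hni : ¬ i < h_.length - 1 := by omega
    simp [hni, List.drop_eq_nil_of_le (by omega : o.length ≤ i),
      List.take_of_length_le (by omega : o.length ≤ i), pvF]
  | succ n ih =>
    intro i hle o hlen
    rw [swapcharsGo]
    by_cases hi : i < h_.length - 1
    · simp only [hi, dif_pos]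
      have hdl : (o.drop i).length = o.length - i := List.length_drop
      rcases hd : o.drop i with _ | ⟨a, tl⟩
      · exfalso; rw [hd] at hdl; simp at hdl; omega
      rcases tl with _ | ⟨b, tl2⟩
      · exfalso; rw [hd] at hdl; simp at hdl; omega
      have ho : o = o.take i ++ a :: b :: tl2 := by rw [← hd, List.take_append_drop]
      have hti : (o.take i).length = i := by simp [List.length_take]; omega
      by_cases hg : i ≠ 28 ∧ i ≠ 27
      · -- swap branch
        have hga : PySem.List.pyGetD o (i : Int) 0 = a := by
          rw [PySem.List.pyGetD_natCast, List.getD_eq_getElem?_getD,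
            show o[i]? = (o.drop i)[0]? by simp [List.getElem?_drop], hd]
          rfl
        have hgb : PySem.List.pyGetD o ((i : Int) + 1) 0 = b := by
          have hc : ((i : Int) + 1) = ((i + 1 : Nat) : Int) := by push_cast; ring
          rw [hc, PySem.List.pyGetD_natCast, List.getD_eq_getElem?_getD,
            show o[i + 1]? = (o.drop i)[1]? by simp [List.getElem?_drop], hd]
          rfl
        have hset : PySem.List.pySetD (PySem.List.pySetD o ((i : Int) + 1) a) (i : Int) b
            = o.take i ++ b :: a :: tl2 := by
          have hc : ((i : Int) + 1) = ((i + 1 : Nat) : Int) := by push_cast; ring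
          rw [hc, PySem.List.pySetD_natCast, PySem.List.pySetD_natCast]
          conv_lhs => rw [ho]
          exact swap_set _ a b tl2 i hti
        rw [hga, hgb, if_pos hg, hset]
        have hlen2 : (o.take i ++ b :: a :: tl2).length = h_.length := by
          have h2 : (o.drop i).length = tl2.length + 2 := by rw [hd]; simp
          rw [List.length_drop] at h2
          simp [List.length_take]
          omega
        rw [ih (i + 3) (by omega) _ hlen2]
        rw [show i + 3 = (o.take i).length + 3 from by omega, take_app, drop_app,
          show (o.take i).length = i from hti]
        rcases tl2 with _ | ⟨c0, rest⟩ <;>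
          simp [pvF, hg.1, hg.2]
      · -- skip branch
        rw [if_neg hg]
        rw [ih (i + 3) (by omega) o hlen]
        conv_lhs => rw [ho, show i + 3 = (o.take i).length + 3 from by omega, take_app, drop_app]
        rw [show (o.take i).length = i from hti]
        have hg' : i = 28 ∨ i = 27 := by omega
        rcases tl2 with _ | ⟨c0, rest⟩ <;>
          simp [pvF, hg']
    · have hge : h_.length - 1 ≤ i := by omega
      simp only [hi, dif_neg, not_false_iff]
      rcases hd : o.drop i with _ | ⟨a, tl⟩
      · simp [pvF, ← hd, List.take_append_drop]
      rcases tl with _ | ⟨b, tl2⟩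
      · simp [pvF, ← hd, List.take_append_drop]
      · exfalso
        have hdl : (o.drop i).length = o.length - i := List.length_drop
        rw [hd] at hdl; simp at hdl; omega

-- value of srcIdx at a Nat index, by its residue mod 3
lemma srcIdx_mod0 (n : Int) (i : Nat) (h3 : i % 3 = 0) (h27 : i ≠ 27) (hlt : (i : Int) + 1 < n) :
    srcIdx n (i : Int) = (i : Int) + 1 := by
  unfold srcIdx
  have hm : PySem.Int.mod (i : Int) 3 = ((i % 3 : Nat) : Int) := by
    rw [PySem.Int.mod_eq_emod_of_pos (by norm_num)]; omega
  rw [hm, h3]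
  simp only [Nat.cast_zero]
  rw [if_pos ⟨trivial, hlt, by exact_mod_cast h27⟩]

lemma srcIdx_mod0_skip (n : Int) (i : Nat) (h3 : i % 3 = 0) (h : ¬ ((i : Int) + 1 < n ∧ i ≠ 27)) :
    srcIdx n (i : Int) = (i : Int) := by
  unfold srcIdx
  have hm : PySem.Int.mod (i : Int) 3 = ((i % 3 : Nat) : Int) := by
    rw [PySem.Int.mod_eq_emod_of_pos (by norm_num)]; omega
  rw [hm, h3]
  simp only [Nat.cast_zero]
  rw [if_neg, if_neg]
  · simp
  · intro hc
    exact h ⟨hc.2.1, by intro he; exact hc.2.2 (by exact_mod_cast he)⟩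

lemma srcIdx_mod1 (n : Int) (i : Nat) (h3 : i % 3 = 1) (h28 : i ≠ 28) :
    srcIdx n (i : Int) = (i : Int) - 1 := by
  unfold srcIdx
  have hm : PySem.Int.mod (i : Int) 3 = ((i % 3 : Nat) : Int) := by
    rw [PySem.Int.mod_eq_emod_of_pos (by norm_num)]; omega
  rw [hm, h3]
  simp only [Nat.cast_one]
  rw [if_neg (by simp), if_pos ⟨trivial, by exact_mod_cast h28⟩]

lemma srcIdx_mod1_skip (n : Int) (i : Nat) (h3 : i % 3 = 1) (h28 : i = 28) :
    srcIdx n (i : Int) = (i : Int) := by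
  unfold srcIdx
  have hm : PySem.Int.mod (i : Int) 3 = ((i % 3 : Nat) : Int) := by
    rw [PySem.Int.mod_eq_emod_of_pos (by norm_num)]; omega
  rw [hm, h3]
  simp only [Nat.cast_one]
  rw [if_neg (by simp), if_neg (by simp [h28])]

lemma srcIdx_mod2 (n : Int) (i : Nat) (h3 : i % 3 = 2) :
    srcIdx n (i : Int) = (i : Int) := by
  unfold srcIdx
  have hm : PySem.Int.mod (i : Int) 3 = ((i % 3 : Nat) : Int) := by
    rw [PySem.Int.mod_eq_emod_of_pos (by norm_num)]; omega
  rw [hm, h3]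
  rw [if_neg (by simp), if_neg (by simp)]

lemma getD_of_drop (h_ : List Int) (i k : Nat) (l : List Int) (hd : h_.drop i = l) (_hk : k < l.length) :
    PySem.List.pyGetD h_ ((i : Int) + (k : Int)) 0 = l.getD k 0 := by
  have hc : ((i : Int) + (k : Int)) = ((i + k : Nat) : Int) := by push_cast; ring
  rw [hc, PySem.List.pyGetD_natCast, List.getD_eq_getElem?_getD,
    show h_[i + k]? = (h_.drop i)[k]? by simp [List.getElem?_drop], hd,
    ← List.getD_eq_getElem?_getD]

lemma altEq (h_ : List Int) : ∀ (n i : Nat), h_.length - i ≤ n → i % 3 = 0 →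
    (PySem.List.pyRange (i : Int) (h_.length : Int) 1).map
      (fun j => PySem.List.pyGetD h_ (srcIdx (h_.length : Int) j) 0) = pvF i (h_.drop i) := by
  intro n
  induction n with
  | zero =>
    intro i hle h3
    rw [PySem.List.pyRange_one_eq_nil (by exact_mod_cast by omega),
      List.drop_eq_nil_of_le (by omega : h_.length ≤ i)]
    simp [pvF]
  | succ n ih =>
    intro i hle h3
    by_cases hi : i < h_.length
    · have hdl : (h_.drop i).length = h_.length - i := List.length_drop
      rcases hd : h_.drop i with _ | ⟨a, tl⟩
      · exfalso; rw [hd] at hdl; simp at hdl; omega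
      rcases tl with _ | ⟨b, tl2⟩
      · -- lone trailing element: len = i + 1
        have hlen : h_.length = i + 1 := by rw [hd] at hdl; simp at hdl; omega
        have hga : PySem.List.pyGetD h_ (i : Int) 0 = a := by
          simpa using getD_of_drop h_ i 0 _ hd (by simp)
        rw [PySem.List.pyRange_one_cons (by exact_mod_cast hi),
          PySem.List.pyRange_one_eq_nil (by rw [hlen]; push_cast; omega)]
        have hs : srcIdx (h_.length : Int) (i : Int) = (i : Int) :=
          srcIdx_mod0_skip _ _ h3
            (by intro hc; exact absurd hc.1 (by rw [hlen]; push_cast; omega))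
        simp only [List.map_cons, List.map_nil, hs, hga]
        simp [pvF]
      rcases tl2 with _ | ⟨c0, rest⟩
      · -- two trailing elements: len = i + 2
        have hlen : h_.length = i + 2 := by rw [hd] at hdl; simp at hdl; omega
        have hga : PySem.List.pyGetD h_ (i : Int) 0 = a := by
          simpa using getD_of_drop h_ i 0 _ hd (by simp)
        have hgb : PySem.List.pyGetD h_ ((i : Int) + 1) 0 = b := by
          simpa using getD_of_drop h_ i 1 _ hd (by simp)
        rw [PySem.List.pyRange_one_cons (by exact_mod_cast hi),
          PySem.List.pyRange_one_cons (by rw [hlen]; push_cast; omega),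
          PySem.List.pyRange_one_eq_nil (by rw [hlen]; push_cast; omega)]
        by_cases h27 : i = 27
        · have hs1 : srcIdx (h_.length : Int) (i : Int) = (i : Int) :=
            srcIdx_mod0_skip _ _ h3 (by intro hc; exact hc.2 h27)
          have hs2 : srcIdx (h_.length : Int) ((i : Int) + 1) = (i : Int) + 1 := by
            have := srcIdx_mod1_skip (h_.length : Int) (i + 1) (by omega) (by omega)
            rwa [show ((i + 1 : Nat) : Int) = (i : Int) + 1 from by push_cast; ring] at this
          simp only [List.map_cons, List.map_nil, hs1, hs2, hga, hgb]
          simp [pvF, h27]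
        · have hs1 : srcIdx (h_.length : Int) (i : Int) = (i : Int) + 1 :=
            srcIdx_mod0 _ _ h3 h27 (by rw [hlen]; push_cast; omega)
          have hs2 : srcIdx (h_.length : Int) ((i : Int) + 1) = (i : Int) := by
            have := srcIdx_mod1 (h_.length : Int) (i + 1) (by omega) (by omega)
            rw [show ((i + 1 : Nat) : Int) = (i : Int) + 1 from by push_cast; ring] at this
            rw [this]; ring
          simp only [List.map_cons, List.map_nil, hs1, hs2, hga, hgb]
          simp [pvF, h27, show i ≠ 28 from by omega]
      · -- full chunk: i + 3 ≤ len
        have hlen3 : i + 3 ≤ h_.length := by rw [hd] at hdl; simp at hdl; omega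
        have hga : PySem.List.pyGetD h_ (i : Int) 0 = a := by
          simpa using getD_of_drop h_ i 0 _ hd (by simp)
        have hgb : PySem.List.pyGetD h_ ((i : Int) + 1) 0 = b := by
          simpa using getD_of_drop h_ i 1 _ hd (by simp)
        have hgc : PySem.List.pyGetD h_ ((i : Int) + 1 + 1) 0 = c0 := by
          have := getD_of_drop h_ i 2 _ hd (by simp)
          rw [show (i : Int) + ((2 : Nat) : Int) = (i : Int) + 1 + 1 from by push_cast; ring] at this
          simpa using this
        rw [PySem.List.pyRange_one_append (i : Int) ((i : Int) + 3) (h_.length : Int)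
            (by omega) (by exact_mod_cast by omega : ((i : Int) + 3) ≤ (h_.length : Int)),
          List.map_append]
        rw [PySem.List.pyRange_one_cons (by omega), PySem.List.pyRange_one_cons (by omega),
          PySem.List.pyRange_one_cons (by omega), PySem.List.pyRange_one_eq_nil (by omega)]
        have hrec : (PySem.List.pyRange ((i : Int) + 3) (h_.length : Int) 1).map
            (fun j => PySem.List.pyGetD h_ (srcIdx (h_.length : Int) j) 0) = pvF (i + 3) (h_.drop (i + 3)) := by
          have := ih (i + 3) (by omega) (by omega)
          rwa [show ((i + 3 : Nat) : Int) = (i : Int) + 3 from by push_cast; ring] at this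
        have hdd : h_.drop (i + 3) = rest := by
          have h1 : (h_.drop i).drop 3 = rest := by rw [hd]; rfl
          rwa [List.drop_drop] at h1
        rw [hrec, hdd]
        have hs3 : srcIdx (h_.length : Int) ((i : Int) + 1 + 1) = (i : Int) + 1 + 1 := by
          have := srcIdx_mod2 (h_.length : Int) (i + 2) (by omega)
          rwa [show ((i + 2 : Nat) : Int) = (i : Int) + 1 + 1 from by push_cast; ring] at this
        by_cases h27 : i = 27
        · have hs1 : srcIdx (h_.length : Int) (i : Int) = (i : Int) :=
            srcIdx_mod0_skip _ _ h3 (by intro hc; exact hc.2 h27)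
          have hs2 : srcIdx (h_.length : Int) ((i : Int) + 1) = (i : Int) + 1 := by
            have := srcIdx_mod1_skip (h_.length : Int) (i + 1) (by omega) (by omega)
            rwa [show ((i + 1 : Nat) : Int) = (i : Int) + 1 from by push_cast; ring] at this
          simp only [List.map_cons, List.map_nil, hs1, hs2, hs3, hga, hgb, hgc]
          simp [pvF, h27]
        · have hs1 : srcIdx (h_.length : Int) (i : Int) = (i : Int) + 1 :=
            srcIdx_mod0 _ _ h3 h27 (by omega)
          have hs2 : srcIdx (h_.length : Int) ((i : Int) + 1) = (i : Int) := by
            have := srcIdx_mod1 (h_.length : Int) (i + 1) (by omega) (by omega)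
            rw [show ((i + 1 : Nat) : Int) = (i : Int) + 1 from by push_cast; ring] at this
            rw [this]; ring
          simp only [List.map_cons, List.map_nil, hs1, hs2, hs3, hga, hgb, hgc]
          simp [pvF, h27, show i ≠ 28 from by omega]
    · rw [PySem.List.pyRange_one_eq_nil (by exact_mod_cast by omega),
        List.drop_eq_nil_of_le (by omega : h_.length ≤ i)]
      simp [pvF]

-- ===== VERDICT (by name: the statement is the Claim_ definition above) =====
theorem swapchars_spec : Claim_equal_swapchars := by
  intro h_ _
  unfold Spec_swapchars swapchars swapchars_alt
  rw [PySem.List.map_pyGetD_pyRange_zero']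
  rw [goA_eq h_ h_.length 0 (by omega) h_ rfl]
  have hB := altEq h_ h_.length 0 (by omega) rfl
  simp only [Int.natCast_zero] at hB
  rw [hB]
  simp
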